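-- pv_equiv track=rewrite | github.com/KartikKrishnan05/TelloDrone | ArucoTagScripts/Floor/mainFlightBack.py | iter_drop_n
-- ===== SOURCE A (Python) =====
-- def iter_drop_n(data):
--     result = []
--     first = True
--
--     for command, value in data:
--         if command == 'move_forward' and first:
--             first = False
--         elif not first:
--             result.append((command, value))
--
--     return result
-- ===== SOURCE B (Python) =====
-- def iter_drop_n(data):
--     data = list(data)
--     for i, (command, value) in enumerate(data):
--         if command == 'move_forward':
--             return data[i + 1:]
--     return []
-- ===== Notes on version B (the rewrite author's own statement) =====
-- stated objective: simpler
-- what changed: Replaces A's flag-and-append accumulation with a locate-then-slice: find the index of the first 'move_forward' and return the slice after it (empty when no such command occurs).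
import Mathlib
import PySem

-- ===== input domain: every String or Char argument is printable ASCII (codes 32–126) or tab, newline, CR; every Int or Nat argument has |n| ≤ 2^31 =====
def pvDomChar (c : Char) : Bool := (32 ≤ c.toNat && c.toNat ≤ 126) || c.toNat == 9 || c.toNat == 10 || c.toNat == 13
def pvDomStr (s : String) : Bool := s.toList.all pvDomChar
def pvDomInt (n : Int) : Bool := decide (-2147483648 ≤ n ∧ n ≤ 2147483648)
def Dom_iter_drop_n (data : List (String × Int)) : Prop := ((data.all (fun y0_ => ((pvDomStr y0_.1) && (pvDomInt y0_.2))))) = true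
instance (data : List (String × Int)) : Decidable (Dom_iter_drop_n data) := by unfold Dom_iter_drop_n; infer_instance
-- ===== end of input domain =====

-- B replaces A's flag-and-append accumulation with locate-then-slice (simpler decomposition, same cost).

-- ===== PORT A =====
-- A's loop state: (result, first); branch order as in A.
def pvStepA (st : List (String × Int) × Bool) (cv : String × Int) :
    List (String × Int) × Bool :=
  if cv.1 == "move_forward" && st.2 then (st.1, false)
  else if !st.2 then (st.1 ++ [cv], st.2)
  else st

def iter_drop_n (data : List (String × Int)) : List (String × Int) :=
  (data.foldl pvStepA ([], true)).1

-- ===== PORT B =====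
-- Source B's loop over enumerate(data); on the first 'move_forward' at index i return data[i+1:].
def iter_drop_n_altGo (data : List (String × Int)) :
    List (Int × (String × Int)) → List (String × Int)
  | [] => []
  | (i, cv) :: rest =>
      if cv.1 == "move_forward" then PySem.List.slice data (some (i + 1)) none
      else iter_drop_n_altGo data rest

def iter_drop_n_alt (data : List (String × Int)) : List (String × Int) :=
  iter_drop_n_altGo data (PySem.List.enumerate data)

-- ===== PRECONDITION & SPEC =====
def Spec_iter_drop_n (data : List (String × Int)) (out : List (String × Int)) : Prop := out = iter_drop_n_alt data
instance (data : List (String × Int)) (out : List (String × Int)) : Decidable (Spec_iter_drop_n data out) := by unfold Spec_iter_drop_n; infer_instance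

-- ===== CLAIM (what is proved, stated in full; the proofs are below) =====
def Claim_equal_iter_drop_n : Prop := ∀ (data : List (String × Int)), Dom_iter_drop_n data → Spec_iter_drop_n data (iter_drop_n data)

-- ===== LEMMAS AND PROOFS =====

-- common characterisation: the suffix after the first 'move_forward', [] if none
def pvAfterMF : List (String × Int) → List (String × Int)
  | [] => []
  | cv :: t => if cv.1 == "move_forward" then t else pvAfterMF t

theorem iter_drop_n_foldl_false (l : List (String × Int)) (acc : List (String × Int)) :
    l.foldl pvStepA (acc, false) = (acc ++ l, false) := by
  induction l generalizing acc with
  | nil => simp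
  | cons h t ih => rw [List.foldl_cons]; simp only [pvStepA]; simp [ih]

theorem iter_drop_n_eq_afterMF (data : List (String × Int)) :
    iter_drop_n data = pvAfterMF data := by
  induction data with
  | nil => rfl
  | cons h t ih =>
    unfold iter_drop_n
    rw [List.foldl_cons]
    by_cases hm : h.1 == "move_forward"
    · have hstep : pvStepA ([], true) h = ([], false) := by simp [pvStepA, hm]
      rw [hstep, iter_drop_n_foldl_false]
      simp [pvAfterMF, hm]
    · have hstep : pvStepA ([], true) h = ([], true) := by simp [pvStepA, hm]
      rw [hstep]
      simpa [pvAfterMF, hm, iter_drop_n] using ih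

theorem iter_drop_n_altGo_eq (pre suf : List (String × Int)) :
    iter_drop_n_altGo (pre ++ suf) (PySem.List.enumerate suf (pre.length : Int)) =
      pvAfterMF suf := by
  induction suf generalizing pre with
  | nil => simp [PySem.List.enumerate_nil, iter_drop_n_altGo, pvAfterMF]
  | cons h t ih =>
    rw [PySem.List.enumerate_cons]
    by_cases hm : h.1 == "move_forward"
    · have hs : PySem.List.slice (pre ++ h :: t) (some ((pre.length : Int) + 1)) none
          = (pre ++ h :: t).drop (pre.length + 1) := by
        have hc : ((pre.length : Int) + 1) = ((pre.length + 1 : Nat) : Int) := by push_cast; ring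
        rw [hc, PySem.List.slice_from_natCast]
      have hd : (pre ++ h :: t).drop (pre.length + 1) = t := by
        clear ih hm hs; induction pre with | nil => rfl | cons a l ihp => simpa using ihp
      rw [iter_drop_n_altGo, if_pos hm, hs, hd]
      simp [pvAfterMF, hm]
    · have hcast : (pre.length : Int) + 1 = (((pre ++ [h]).length : Nat) : Int) := by
        push_cast; simp
      have h2 : pre ++ h :: t = (pre ++ [h]) ++ t := by simp
      rw [iter_drop_n_altGo, if_neg (by simpa using hm), hcast, h2, ih (pre ++ [h])]
      simp [pvAfterMF, hm]

theorem iter_drop_n_alt_eq_afterMF (data : List (String × Int)) :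
    iter_drop_n_alt data = pvAfterMF data := by
  have := iter_drop_n_altGo_eq [] data
  simpa [iter_drop_n_alt, PySem.List.enumerate] using this

-- ===== VERDICT (by name: the statement is the Claim_ definition above) =====
theorem iter_drop_n_spec : Claim_equal_iter_drop_n := by
  intro data _
  unfold Spec_iter_drop_n
  rw [iter_drop_n_eq_afterMF, iter_drop_n_alt_eq_afterMF]
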